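-- pv_equiv track=rewrite | github.com/RicePandaaaa/Canvas_Accessibility_Helper | multimedia_to_word.py | reconstruct_sentences
-- ===== SOURCE A (Python) =====
-- def reconstruct_sentences(text_chunks: list[str]) -> str:
--     """
--     Reconstruct sentences from text chunks.
--
--     Concatenates text chunks until terminal punctuation (. ! ?) is found.
--     Adapted from vtt_to_transcript.py.
--
--     Args:
--         text_chunks: List of text fragments
--
--     Returns:
--         String with properly reconstructed sentences
--     """
--     sentences = []
--     current_sentence = ""
--     sentence_punctuations = ['.', '!', '?']
--
--     for text in text_chunks:
--         # Skip empty text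
--         if not text:
--             continue
--
--         # If ending punctuation is found, add to current sentence and finalize
--         if text[-1] in sentence_punctuations:
--             current_sentence += text + " "
--             sentences.append(current_sentence)
--             current_sentence = ""
--         else:
--             # Add the text with a space for the next text
--             current_sentence += text + " "
--
--     # Add any remaining text
--     if current_sentence:
--         sentences.append(current_sentence)
--
--     return ''.join(sentences).strip()
-- ===== SOURCE B (Python) =====
-- def reconstruct_sentences(text_chunks: list[str]) -> str:
--     """Join the nonempty chunks with single spaces; the punctuation bookkeeping in A
--     never affects the output, since its pieces are ''-joined and stripped."""
--     return ' '.join(t for t in text_chunks if t).strip()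
-- ===== Notes on version B (the rewrite author's own statement) =====
-- stated objective: simpler
-- what changed: Dropped the current_sentence accumulator, the sentences list and the terminal-punctuation branch entirely: since A ''-joins all accumulated pieces and strips, each nonempty chunk contributes itself plus one space regardless of punctuation, so B is a one-line filter-and-' '.join followed by strip.
import Mathlib
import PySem

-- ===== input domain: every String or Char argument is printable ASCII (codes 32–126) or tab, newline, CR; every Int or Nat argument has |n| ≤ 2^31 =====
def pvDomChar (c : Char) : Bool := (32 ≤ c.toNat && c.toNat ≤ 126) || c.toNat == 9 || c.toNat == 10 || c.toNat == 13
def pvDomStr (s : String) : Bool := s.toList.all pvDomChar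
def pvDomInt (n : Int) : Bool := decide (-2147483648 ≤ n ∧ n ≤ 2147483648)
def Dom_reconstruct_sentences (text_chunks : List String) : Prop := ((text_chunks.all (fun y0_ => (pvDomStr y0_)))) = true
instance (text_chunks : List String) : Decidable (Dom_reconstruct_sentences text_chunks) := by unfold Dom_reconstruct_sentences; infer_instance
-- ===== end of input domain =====

-- B (simpler): A's punctuation/accumulator bookkeeping never affects the output, so B is just
-- ' '.join of the nonempty chunks, stripped.

-- ===== PORT A =====
-- loop body of A's for-loop (state = (sentences, current_sentence))
def pvStepA (acc : List String × String) (text : String) : List String × String :=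
  if text = "" then acc
  else if (PySem.Str.pyGet? text (-1)).any (fun c => (['.', '!', '?'] : List Char).contains c) then
    (acc.1 ++ [acc.2 ++ text ++ " "], "")
  else
    (acc.1, acc.2 ++ text ++ " ")

def reconstruct_sentences (text_chunks : List String) : String :=
  let st := text_chunks.foldl pvStepA ([], "")
  let sentences := if st.2 = "" then st.1 else st.1 ++ [st.2]
  PySem.Str.strip (PySem.Str.join "" sentences)

-- ===== PORT B =====
def reconstruct_sentences_alt (text_chunks : List String) : String :=
  PySem.Str.strip (PySem.Str.join " " (text_chunks.filter (fun t => !(t == ""))))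

-- ===== PRECONDITION & SPEC =====
def Spec_reconstruct_sentences (text_chunks : List String) (out : String) : Prop := out = reconstruct_sentences_alt text_chunks
instance (text_chunks : List String) (out : String) : Decidable (Spec_reconstruct_sentences text_chunks out) := by unfold Spec_reconstruct_sentences; infer_instance

-- ===== CLAIM (what is proved, stated in full; the proofs are below) =====
def Claim_equal_reconstruct_sentences : Prop := ∀ (text_chunks : List String), Dom_reconstruct_sentences text_chunks → Spec_reconstruct_sentences text_chunks (reconstruct_sentences text_chunks)

-- ===== LEMMAS AND PROOFS =====

theorem pv_space_toList : (" " : String).toList = [' '] := by decide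

-- the character contribution of one chunk to A's accumulated text
def pvPiece (t : String) : List Char := if t = "" then [] else t.toList ++ [' ']

def pvG : List String → List Char
  | [] => []
  | t :: ts => pvPiece t ++ pvG ts

theorem pv_join_nil_sep (l : List (List Char)) : PySem.Chars.join [] l = l.flatten := by
  induction l with
  | nil => rw [PySem.Chars.join_nil]; rfl
  | cons a l ih =>
    cases l with
    | nil => rw [PySem.Chars.join_singleton]; simp
    | cons b m => rw [PySem.Chars.join_cons_cons, ih]; simp

theorem pv_isspace_space : PySem.Chars.isspace ' ' = true := by decide

theorem pv_rstrip_space (l : List Char) :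
    PySem.Chars.rstrip (l ++ [' ']) = PySem.Chars.rstrip l := by
  simp [PySem.Chars.rstrip, pv_isspace_space]

theorem pv_strip_space (l : List Char) :
    PySem.Chars.strip (l ++ [' ']) = PySem.Chars.strip l := by
  unfold PySem.Chars.strip PySem.Chars.lstrip
  rw [List.dropWhile_append]
  by_cases h : List.dropWhile PySem.Chars.isspace l = []
  · simp [h, pv_isspace_space, PySem.Chars.rstrip]
  · simp only [h, List.isEmpty_iff, if_false]
    exact pv_rstrip_space _

-- flatten of A's accumulator state
def pvFlat (st : List String × String) : List Char :=
  (st.1.map String.toList).flatten ++ st.2.toList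

theorem pv_fold_inv (chunks : List String) : ∀ (ss : List String) (cur : String),
    pvFlat (chunks.foldl pvStepA (ss, cur)) = pvFlat (ss, cur) ++ pvG chunks := by
  induction chunks with
  | nil => intro ss cur; simp [pvG]
  | cons t ts ih =>
    intro ss cur
    rw [List.foldl_cons]
    by_cases h : t = ""
    · rw [show pvStepA (ss, cur) t = (ss, cur) from by simp [pvStepA, h], ih]
      simp [pvG, pvPiece, h]
    · by_cases hp : (PySem.Str.pyGet? t (-1)).any (fun c => (['.', '!', '?'] : List Char).contains c)
      · rw [show pvStepA (ss, cur) t = (ss ++ [cur ++ t ++ " "], "") from by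
            simp only [pvStepA, if_neg h, if_pos hp], ih]
        simp [pvFlat, pvG, pvPiece, h, pv_space_toList]
      · rw [show pvStepA (ss, cur) t = (ss, cur ++ t ++ " ") from by
            simp only [pvStepA, if_neg h, if_neg hp], ih]
        simp [pvFlat, pvG, pvPiece, h, pv_space_toList]

theorem pv_A_toList (tc : List String) :
    (reconstruct_sentences tc).toList = PySem.Chars.strip (pvG tc) := by
  simp only [reconstruct_sentences]
  have h := pv_fold_inv tc [] ""
  simp only [pvFlat, List.map_nil, List.flatten_nil, String.toList_empty, List.nil_append,
    List.append_nil] at h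
  by_cases hc : (tc.foldl pvStepA ([], "")).2 = ""
  · rw [if_pos hc]
    rw [hc, String.toList_empty, List.append_nil] at h
    simp only [PySem.Str.toList_strip, PySem.Str.toList_join, String.toList_empty]
    rw [pv_join_nil_sep, h]
  · rw [if_neg hc]
    simp only [PySem.Str.toList_strip, PySem.Str.toList_join, String.toList_empty]
    rw [pv_join_nil_sep]
    simp only [List.map_append, List.map_cons, List.map_nil, List.flatten_append,
      List.flatten_cons, List.flatten_nil, List.append_nil]
    rw [h]

theorem pv_G_eq (tc : List String) :
    pvG tc = ((tc.filter (fun t => !(t == ""))).map (fun t => t.toList ++ [' '])).flatten := by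
  induction tc with
  | nil => simp [pvG]
  | cons t ts ih =>
    by_cases h : t = ""
    · simp [pvG, pvPiece, h, ih]
    · simp [pvG, pvPiece, h, ih]

theorem pv_flatten_pieces (parts : List (List Char)) :
    (parts.map (· ++ [' '])).flatten =
      if parts = [] then [] else PySem.Chars.join [' '] parts ++ [' '] := by
  induction parts with
  | nil => simp
  | cons p m ih =>
    cases m with
    | nil => rw [PySem.Chars.join_singleton]; simp
    | cons q r =>
      simp only [List.map_cons, List.flatten_cons] at ih ⊢
      simp only [reduceCtorEq, if_false] at ih
      rw [PySem.Chars.join_cons_cons]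
      simp [ih]

-- ===== VERDICT (by name: the statement is the Claim_ definition above) =====
theorem reconstruct_sentences_spec : Claim_equal_reconstruct_sentences := by
  intro tc _
  unfold Spec_reconstruct_sentences reconstruct_sentences_alt
  apply String.toList_inj.mp
  rw [pv_A_toList, pv_G_eq]
  have hmm : (tc.filter (fun t => !(t == ""))).map (fun t => t.toList ++ [' '])
      = ((tc.filter (fun t => !(t == ""))).map String.toList).map (· ++ [' ']) := by
    simp [List.map_map]
  rw [hmm, pv_flatten_pieces]
  by_cases h : (tc.filter (fun t => !(t == ""))).map String.toList = []
  · have hf : tc.filter (fun t => !(t == "")) = [] := List.map_eq_nil_iff.mp h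
    rw [if_pos h, hf]
    simp [PySem.Str.toList_strip, PySem.Str.toList_join, PySem.Chars.join_nil,
      PySem.Chars.strip, PySem.Chars.lstrip, PySem.Chars.rstrip]
  · rw [if_neg h, pv_strip_space]
    simp [PySem.Str.toList_strip, PySem.Str.toList_join, pv_space_toList]
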